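-- pv_equiv track=rewrite | github.com/ftakanashi/JobProjects | LeetCode/面试题16.19.水域大小/main.py | pondSizes
-- ===== SOURCE A (Python) =====
-- from typing import List
-- import itertools
--
-- def pondSizes(land: List[List[int]]) -> List[int]:
--     m, n = len(land), len(land[0])
--     direcs = list(itertools.product([-1, 0, 1], [-1, 0, 1]))
--     seen = set()
--
--     def dfs(x, y):
--         seen.add((x, y))
--         tmp = 0
--         for a, b in direcs:
--             if a == b == 0: continue
--             nx, ny = x + a, y + b
--             if nx < 0 or nx >= m or ny < 0 or ny >= n: continue
--             if land[nx][ny] != 0: continue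
--             if (nx, ny) in seen: continue
--             tmp += dfs(nx, ny)
--         return tmp + 1
--
--     ponds = []
--     for i in range(m):
--         for j in range(n):
--             if land[i][j] != 0: continue
--             if (i, j) in seen: continue
--             ponds.append(dfs(i, j))
--
--     ponds.sort()
--     return ponds
-- ===== SOURCE B (Python) =====
-- from typing import List
--
-- _OFFS = ((-1, -1), (-1, 0), (-1, 1), (0, -1), (0, 1), (1, -1), (1, 0), (1, 1))
--
-- def pondSizes(land: List[List[int]]) -> List[int]:
--     m, n = len(land), len(land[0])
--     water = [(i, j) for i in range(m) for j in range(n) if land[i][j] == 0]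
--     waterset = set(water)
--     seen = set()
--     ponds = []
--     for cell in water:
--         if cell in seen:
--             continue
--         comp = {cell}
--         frontier = [cell]
--         while frontier:
--             nxt = []
--             for (x, y) in frontier:
--                 for (a, b) in _OFFS:
--                     q = (x + a, y + b)
--                     if q in waterset and q not in comp:
--                         comp.add(q)
--                         nxt.append(q)
--             frontier = nxt
--         seen |= comp
--         ponds.append(len(comp))
--     return sorted(ponds)
-- ===== Notes on version B (the rewrite author's own statement) =====
-- stated objective: alternative
-- what changed: Recursive count-on-return DFS driven by nested index ranges with per-neighbour bounds/value checks is replaced by a two-stage algorithm: the list of water cells is computed once up front, the scan iterates over that list, and each new component is grown by level-order frontier expansion (BFS) whose neighbour test is membership in the precomputed water set.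
import Mathlib
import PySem

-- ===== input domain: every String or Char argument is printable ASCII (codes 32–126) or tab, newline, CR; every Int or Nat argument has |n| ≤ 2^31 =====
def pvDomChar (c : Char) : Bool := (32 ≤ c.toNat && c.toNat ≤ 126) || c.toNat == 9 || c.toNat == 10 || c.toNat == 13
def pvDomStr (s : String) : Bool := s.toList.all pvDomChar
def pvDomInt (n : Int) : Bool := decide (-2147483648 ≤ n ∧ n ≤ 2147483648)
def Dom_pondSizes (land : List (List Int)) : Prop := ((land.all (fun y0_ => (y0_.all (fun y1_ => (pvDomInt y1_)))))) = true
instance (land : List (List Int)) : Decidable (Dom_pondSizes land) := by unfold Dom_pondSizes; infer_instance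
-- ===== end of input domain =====

-- B replaces A's recursive 8-neighbour DFS over nested index ranges by a two-stage scan:
-- the water-cell list is computed once, then each new component is grown by level-order
-- frontier expansion against that precomputed set. A mutates nothing observable.

-- ===== PORT A =====
-- cell access land[x][y]; in A it is only evaluated after the bounds check, and under
-- Pre_ every row has length ≥ n, so the .getD defaults are never exercised.
def pvCell (land : List (List Int)) (x y : Int) : Int :=
  (PySem.List.pyGet? ((PySem.List.pyGet? land x).getD []) y).getD 1

-- list(itertools.product([-1,0,1],[-1,0,1]))
def pvDirecs : List (Int × Int) :=
  ([-1, 0, 1] : List Int).flatMap (fun a => ([-1, 0, 1] : List Int).map (fun b => (a, b)))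

-- the recursive dfs; fuel m*n+1 (strictly more than the number of possible recursive calls,
-- each of which marks a fresh unseen cell) makes the recursion structural
def pvDfsA (land : List (List Int)) (m n : Int) :
    Nat → List (Int × Int) → Int → Int → Int × List (Int × Int)
  | 0, seen, _, _ => (0, seen)
  | fuel+1, seen, x, y =>
    let seen1 := PySem.Set.add seen (x, y)
    let r := pvDirecs.foldl (fun (st : Int × List (Int × Int)) ab =>
      if ab.1 = 0 ∧ ab.2 = 0 then st
      else
        let nx := x + ab.1
        let ny := y + ab.2
        if nx < 0 ∨ nx ≥ m ∨ ny < 0 ∨ ny ≥ n then st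
        else if pvCell land nx ny ≠ 0 then st
        else if (nx, ny) ∈ st.2 then st
        else
          let r2 := pvDfsA land m n fuel st.2 nx ny
          (st.1 + r2.1, r2.2)) (0, seen1)
    (r.1 + 1, r.2)

-- body of A's inner 'for j in range(n)' loop
def pvStepA (land : List (List Int)) (m n : Int) (fuel : Nat) (i : Int)
    (st : List (Int × Int) × List Int) (j : Int) : List (Int × Int) × List Int :=
  if pvCell land i j ≠ 0 then st
  else if (i, j) ∈ st.1 then st
  else
    let r := pvDfsA land m n fuel st.1 i j
    (r.2, st.2 ++ [r.1])

def pondSizes (land : List (List Int)) : List Int :=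
  let m : Int := land.length
  let n : Int := (((PySem.List.pyGet? land 0).getD []).length : Int)
  let fuel : Nat := land.length * n.toNat + 1
  let r := (PySem.List.pyRange 0 m 1).foldl
    (fun st i => (PySem.List.pyRange 0 n 1).foldl (pvStepA land m n fuel i) st) ([], [])
  PySem.List.sorted r.2 (fun x => x) false

-- ===== PORT B =====
-- _OFFS: the 8 neighbour offsets
def pvOffs : List (Int × Int) :=
  [(-1, -1), (-1, 0), (-1, 1), (0, -1), (0, 1), (1, -1), (1, 0), (1, 1)]

-- [(i, j) for i in range(m) for j in range(n) if land[i][j] == 0]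
def pvWaterList (land : List (List Int)) (m n : Int) : List (Int × Int) :=
  (PySem.List.pyRange 0 m 1).flatMap (fun i =>
    ((PySem.List.pyRange 0 n 1).filter (fun j => decide (pvCell land i j = 0))).map
      (fun j => (i, j)))

-- processing one frontier cell: try the 8 offsets, growing (comp, nxt)
def pvLevelStep (ws : List (Int × Int)) (st : List (Int × Int) × List (Int × Int))
    (c : Int × Int) : List (Int × Int) × List (Int × Int) :=
  pvOffs.foldl (fun st d =>
    let q := (c.1 + d.1, c.2 + d.2)
    if q ∈ ws ∧ q ∉ st.1 then (PySem.Set.add st.1 q, st.2 ++ [q]) else st) st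

-- the 'while frontier:' loop; fuel |water|+2 bounds the number of levels
def pvBfs (ws : List (Int × Int)) : Nat → List (Int × Int) → List (Int × Int) → List (Int × Int)
  | 0, comp, _ => comp
  | fuel+1, comp, frontier =>
    if frontier.isEmpty then comp
    else
      let st := frontier.foldl (pvLevelStep ws) (comp, [])
      pvBfs ws fuel st.1 st.2

-- body of B's 'for cell in water' loop
def pvScan (ws : List (Int × Int)) (fuel : Nat) (st : List (Int × Int) × List Int)
    (c : Int × Int) : List (Int × Int) × List Int :=
  if c ∈ st.1 then st
  else
    let comp := pvBfs ws fuel [c] [c]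
    (PySem.Set.update st.1 comp, st.2 ++ [(comp.length : Int)])

def pondSizes_alt (land : List (List Int)) : List Int :=
  let m : Int := land.length
  let n : Int := (((PySem.List.pyGet? land 0).getD []).length : Int)
  let water := pvWaterList land m n
  let r := water.foldl (pvScan water (water.length + 2)) ([], [])
  PySem.List.sorted r.2 (fun x => x) false

-- ===== PRECONDITION & SPEC =====
-- Pre_ excludes only inputs on which A raises IndexError: empty land (len(land[0])) and
-- grids where some row is shorter than row 0 (land[i][j] / land[nx][ny] with j < n).
def Pre_pondSizes (land : List (List Int)) : Prop :=
  land ≠ [] ∧ ∀ row ∈ land, (land.headD []).length ≤ row.length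
instance (land : List (List Int)) : Decidable (Pre_pondSizes land) := by
  unfold Pre_pondSizes; infer_instance

def pvWitness_pondSizes : List (List Int) := [[0, 1, 0], [1, 0, 0]]

def Spec_pondSizes (land : List (List Int)) (out : List Int) : Prop := out = pondSizes_alt land
instance (land : List (List Int)) (out : List Int) : Decidable (Spec_pondSizes land out) := by
  unfold Spec_pondSizes; infer_instance

-- ===== CLAIM (what is proved, stated in full; the proofs are below) =====
def Claim_equal_pondSizes : Prop :=
  ∀ (land : List (List Int)), Dom_pondSizes land → Pre_pondSizes land →
    Spec_pondSizes land (pondSizes land)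

-- ===== LEMMAS AND PROOFS =====

-- a cell is "water": in bounds and zero
def pvV0 (land : List (List Int)) (m n : Int) (p : Int × Int) : Prop :=
  0 ≤ p.1 ∧ p.1 < m ∧ 0 ≤ p.2 ∧ p.2 < n ∧ pvCell land p.1 p.2 = 0

-- 8-neighbour adjacency
def pvAdj (p q : Int × Int) : Prop :=
  p ≠ q ∧ q.1 - p.1 ≤ 1 ∧ p.1 - q.1 ≤ 1 ∧ q.2 - p.2 ≤ 1 ∧ p.2 - q.2 ≤ 1

-- reachability from p through water cells avoiding the set `avoid`
inductive pvReachA (land : List (List Int)) (m n : Int) (avoid : List (Int × Int))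
    (p : Int × Int) : (Int × Int) → Prop
  | refl : pvReachA land m n avoid p p
  | step {q r : Int × Int} : pvReachA land m n avoid p q → pvAdj q r →
      pvV0 land m n r → r ∉ avoid → pvReachA land m n avoid p r

-- unseen water cells, for the fuel bound
def pvGrid (m n : Int) : List (Int × Int) :=
  (PySem.List.pyRange 0 m 1) ×ˢ (PySem.List.pyRange 0 n 1)

def pvUcard (land : List (List Int)) (m n : Int) (s : List (Int × Int)) : Nat :=
  (pvGrid m n).countP (fun q =>
    decide ((0 ≤ q.1 ∧ q.1 < m ∧ 0 ≤ q.2 ∧ q.2 < n ∧ pvCell land q.1 q.2 = 0) ∧ q ∉ s))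

theorem mem_pvGrid (m n : Int) (q : Int × Int) :
    q ∈ pvGrid m n ↔ 0 ≤ q.1 ∧ q.1 < m ∧ 0 ≤ q.2 ∧ q.2 < n := by
  obtain ⟨a, b⟩ := q
  rw [pvGrid]
  rw [show ((PySem.List.pyRange 0 m 1) ×ˢ (PySem.List.pyRange 0 n 1)) = List.product (PySem.List.pyRange 0 m 1) (PySem.List.pyRange 0 n 1) from rfl]
  rw [List.pair_mem_product]
  simp [PySem.List.mem_pyRange_one]
  tauto

theorem pvGrid_length (m n : Int) : (pvGrid m n).length = m.toNat * n.toNat := by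
  simp [pvGrid, List.length_product, PySem.List.length_pyRange_one]

theorem pvUcard_le (land : List (List Int)) (m n : Int) (s : List (Int × Int)) :
    pvUcard land m n s ≤ m.toNat * n.toNat := by
  calc pvUcard land m n s ≤ (pvGrid m n).length := List.countP_le_length
  _ = m.toNat * n.toNat := pvGrid_length m n

theorem countP_lt_of_witness {α : Type} (L : List α) (f g : α → Bool)
    (h : ∀ x ∈ L, f x = true → g x = true) :
    ∀ x ∈ L, g x = true → f x = false → L.countP f < L.countP g := by
  induction L with
  | nil => intro x hx; simp at hx
  | cons a L ih =>
    intro x hx hg hf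
    have hmono : L.countP f ≤ L.countP g :=
      List.countP_mono_left (fun y hy => h y (List.mem_cons_of_mem _ hy))
    rcases List.mem_cons.mp hx with rfl | hxL
    · simp [List.countP_cons, hg, hf]; omega
    · have := ih (fun y hy => h y (List.mem_cons_of_mem _ hy)) x hxL hg hf
      by_cases hfa : f a = true
      · have hga := h a List.mem_cons_self hfa
        simp [List.countP_cons, hfa, hga]; omega
      · simp only [List.countP_cons]
        have : f a = false := by revert hfa; cases f a <;> simp
        simp [this]; omega

-- adding one fresh water cell to the seen set decreases the unseen count strictly
theorem pvUcard_lt (land : List (List Int)) (m n : Int) (s s' : List (Int × Int))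
    (p : Int × Int) (hv : pvV0 land m n p) (hps : p ∉ s) (hsub : ∀ x ∈ s, x ∈ s')
    (hps' : p ∈ s') : pvUcard land m n s' < pvUcard land m n s := by
  apply countP_lt_of_witness
  · intro x hx hfx
    simp only [decide_eq_true_eq] at hfx ⊢
    exact ⟨hfx.1, fun hc => hfx.2 (hsub _ hc)⟩
  · exact (mem_pvGrid m n p).mpr ⟨hv.1, hv.2.1, hv.2.2.1, hv.2.2.2.1⟩
  · simp only [decide_eq_true_eq]; exact ⟨hv, hps⟩
  · simp only [decide_eq_false_iff_not, not_and, not_not]; intro _; exact hps'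

theorem pvReachA_mono (land : List (List Int)) (m n : Int) (s t : List (Int × Int))
    (p q : Int × Int) (hsub : ∀ x ∈ s, x ∈ t) (h : pvReachA land m n t p q) :
    pvReachA land m n s p q := by
  induction h with
  | refl => exact pvReachA.refl
  | step h1 h2 h3 h4 ih => exact pvReachA.step ih h2 h3 (fun hc => h4 (hsub _ hc))

theorem pvReachA_trans (land : List (List Int)) (m n : Int) (s : List (Int × Int))
    (p q r : Int × Int) (h1 : pvReachA land m n s p q) (h2 : pvReachA land m n s q r) :
    pvReachA land m n s p r := by
  induction h2 with
  | refl => exact h1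
  | step ha hb hc hd ih => exact pvReachA.step ih hb hc hd

theorem pvReachA_notin (land : List (List Int)) (m n : Int) (s : List (Int × Int))
    (p q : Int × Int) (h : pvReachA land m n s p q) (hp : p ∉ s) : q ∉ s := by
  induction h with
  | refl => exact hp
  | step _ _ _ h4 _ => exact h4

theorem mem_pvDirecs (ab : Int × Int) :
    ab ∈ pvDirecs ↔ (-1 ≤ ab.1 ∧ ab.1 ≤ 1 ∧ -1 ≤ ab.2 ∧ ab.2 ≤ 1) := by
  obtain ⟨a, b⟩ := ab
  simp [pvDirecs]
  omega

-- the specification both searches satisfy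
def pvSearchSpec (land : List (List Int)) (m n : Int) (s : List (Int × Int))
    (p : Int × Int) (r : Int × List (Int × Int)) : Prop :=
  r.2.Nodup ∧ (∀ q, q ∈ r.2 ↔ q ∈ s ∨ pvReachA land m n s p q) ∧
    r.1 = (r.2.length : Int) - s.length

-- invariant carried through A's loop over the 8 direction offsets
theorem pvDfsA_fold (land : List (List Int)) (m n : Int) (fuel : Nat)
    (IH : ∀ (s : List (Int × Int)) (x y : Int), s.Nodup → pvV0 land m n (x, y) → (x, y) ∉ s →
      pvUcard land m n s < fuel → pvSearchSpec land m n s (x, y) (pvDfsA land m n fuel s x y))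
    (s : List (Int × Int)) (x y : Int) (hfuel : pvUcard land m n s < fuel + 1)
    (hv : pvV0 land m n (x, y)) (hns : (x, y) ∉ s) :
    ∀ (l : List (Int × Int)), (∀ ab ∈ l, -1 ≤ ab.1 ∧ ab.1 ≤ 1 ∧ -1 ≤ ab.2 ∧ ab.2 ≤ 1) →
    ∀ (t : Int) (cur : List (Int × Int)),
    cur.Nodup → (∀ q ∈ s, q ∈ cur) → (x, y) ∈ cur →
    (∀ q ∈ cur, q ∈ s ∨ pvReachA land m n s (x, y) q) →
    t = (cur.length : Int) - s.length - 1 →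
    (∀ q ∈ cur, q ∉ s → q ≠ (x, y) → ∀ r, pvAdj q r → pvV0 land m n r → r ∈ cur) →
    (fun (R : Int × List (Int × Int)) =>
      R.2.Nodup ∧ (∀ q ∈ cur, q ∈ R.2) ∧ (x, y) ∈ R.2 ∧
      (∀ q ∈ R.2, q ∈ s ∨ pvReachA land m n s (x, y) q) ∧
      R.1 = (R.2.length : Int) - s.length - 1 ∧
      (∀ q ∈ R.2, q ∉ s → q ≠ (x, y) → ∀ r, pvAdj q r → pvV0 land m n r → r ∈ R.2) ∧
      (∀ ab ∈ l, ¬(ab.1 = 0 ∧ ab.2 = 0) → pvV0 land m n (x + ab.1, y + ab.2) →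
        (x + ab.1, y + ab.2) ∈ R.2))
    (l.foldl (fun (st : Int × List (Int × Int)) ab =>
      if ab.1 = 0 ∧ ab.2 = 0 then st
      else
        let nx := x + ab.1
        let ny := y + ab.2
        if nx < 0 ∨ nx ≥ m ∨ ny < 0 ∨ ny ≥ n then st
        else if pvCell land nx ny ≠ 0 then st
        else if (nx, ny) ∈ st.2 then st
        else
          let r2 := pvDfsA land m n fuel st.2 nx ny
          (st.1 + r2.1, r2.2)) (t, cur)) := by
  intro l
  induction l with
  | nil =>
    intro _ t cur h1 h2 h3 h4 h5 h6
    exact ⟨h1, fun q hq => hq, h3, h4, h5, h6, by simp⟩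
  | cons ab l ihl =>
    intro hl t cur h1 h2 h3 h4 h5 h6
    have hlab := hl ab List.mem_cons_self
    have hl' : ∀ ab' ∈ l, -1 ≤ ab'.1 ∧ ab'.1 ≤ 1 ∧ -1 ≤ ab'.2 ∧ ab'.2 ≤ 1 :=
      fun ab' h => hl ab' (List.mem_cons_of_mem _ h)
    rw [List.foldl_cons]
    by_cases h00 : ab.1 = 0 ∧ ab.2 = 0
    · simp only [h00, and_self, if_true, if_pos]
      have hres := ihl hl' t cur h1 h2 h3 h4 h5 h6
      refine ⟨hres.1, hres.2.1, hres.2.2.1, hres.2.2.2.1, hres.2.2.2.2.1, hres.2.2.2.2.2.1,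
        fun ab' hab' hne hv' => ?_⟩
      rcases List.mem_cons.mp hab' with rfl | hab'
      · exact absurd h00 hne
      · exact hres.2.2.2.2.2.2 ab' hab' hne hv'
    · simp only [if_neg h00]
      set nx := x + ab.1 with hnx
      set ny := y + ab.2 with hny
      by_cases hob : nx < 0 ∨ nx ≥ m ∨ ny < 0 ∨ ny ≥ n
      · simp only [if_pos hob]
        have hres := ihl hl' t cur h1 h2 h3 h4 h5 h6
        refine ⟨hres.1, hres.2.1, hres.2.2.1, hres.2.2.2.1, hres.2.2.2.2.1, hres.2.2.2.2.2.1,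
          fun ab' hab' hne hv' => ?_⟩
        rcases List.mem_cons.mp hab' with rfl | hab'
        · exact absurd hob (by
            obtain ⟨hb1, hb2, hb3, hb4, _⟩ := hv'
            push_neg
            exact ⟨hb1, hb2, hb3, hb4⟩)
        · exact hres.2.2.2.2.2.2 ab' hab' hne hv'
      · simp only [if_neg hob]
        by_cases hcz : pvCell land nx ny ≠ 0
        · simp only [if_pos hcz]
          have hres := ihl hl' t cur h1 h2 h3 h4 h5 h6
          refine ⟨hres.1, hres.2.1, hres.2.2.1, hres.2.2.2.1, hres.2.2.2.2.1, hres.2.2.2.2.2.1,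
            fun ab' hab' hne hv' => ?_⟩
          rcases List.mem_cons.mp hab' with rfl | hab'
          · exact absurd hv'.2.2.2.2 hcz
          · exact hres.2.2.2.2.2.2 ab' hab' hne hv'
        · simp only [if_neg hcz]
          by_cases hmem : (nx, ny) ∈ cur
          · simp only [if_pos hmem]
            have hres := ihl hl' t cur h1 h2 h3 h4 h5 h6
            refine ⟨hres.1, hres.2.1, hres.2.2.1, hres.2.2.2.1, hres.2.2.2.2.1,
              hres.2.2.2.2.2.1, fun ab' hab' hne hv' => ?_⟩
            rcases List.mem_cons.mp hab' with rfl | hab'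
            · exact hres.2.1 _ hmem
            · exact hres.2.2.2.2.2.2 ab' hab' hne hv'
          · simp only [if_neg hmem]
            push_neg at hob hcz
            have hvnb : pvV0 land m n (nx, ny) :=
              ⟨hob.1, hob.2.1, hob.2.2.1, hob.2.2.2, hcz⟩
            have hcurlt : pvUcard land m n cur < fuel := by
              have := pvUcard_lt land m n s cur (x, y) hv hns h2 h3
              omega
            have hsub := IH cur nx ny h1 hvnb hmem hcurlt
            obtain ⟨hN, hM, hC⟩ := hsub
            set r2 := pvDfsA land m n fuel cur nx ny with hr2
            have hcursub : ∀ q ∈ cur, q ∈ r2.2 := fun q hq => (hM q).mpr (Or.inl hq)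
            have hadjnb : pvAdj (x, y) (nx, ny) := by
              refine ⟨fun e => h00 ?_, by simp [hnx, hny]; omega⟩
              have e1 : x = nx := congrArg Prod.fst e
              have e2 : y = ny := congrArg Prod.snd e
              constructor <;> omega
            have hreachnb : pvReachA land m n s (x, y) (nx, ny) :=
              pvReachA.step pvReachA.refl hadjnb hvnb (fun hc => hmem (h2 _ hc))
            have hreach : ∀ q ∈ r2.2, q ∈ s ∨ pvReachA land m n s (x, y) q := by
              intro q hq
              rcases (hM q).mp hq with hq' | hq'
              · exact h4 q hq'
              · exact Or.inr (pvReachA_trans land m n s _ _ _ hreachnb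
                  (pvReachA_mono land m n s cur _ _ h2 hq'))
            have hcl : ∀ q ∈ r2.2, q ∉ s → q ≠ (x, y) →
                ∀ r, pvAdj q r → pvV0 land m n r → r ∈ r2.2 := by
              intro q hq hqs hqp r hadj hvr
              rcases (hM q).mp hq with hq' | hq'
              · exact hcursub _ (h6 q hq' hqs hqp r hadj hvr)
              · by_cases hrc : r ∈ cur
                · exact hcursub _ hrc
                · exact (hM r).mpr (Or.inr (pvReachA.step hq' hadj hvr hrc))
            have harith : t + r2.1 = ((r2.2.length : Int)) - (s.length : Int) - 1 := by
              omega
            have hres2 := ihl hl' (t + r2.1) r2.2 hN (fun q hq => hcursub q (h2 q hq))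
              (hcursub _ h3) hreach harith hcl
            obtain ⟨c1, c2, c3, c4, c5, c6, c7⟩ := hres2
            refine ⟨c1, fun q hq => c2 q (hcursub q hq), c3, c4, c5, c6, ?_⟩
            intro ab' hab' hne hv'
            rcases List.mem_cons.mp hab' with rfl | hab'
            · exact c2 _ ((hM _).mpr (Or.inr pvReachA.refl))
            · exact c7 ab' hab' hne hv'

theorem pvDfsA_spec (land : List (List Int)) (m n : Int) :
    ∀ (fuel : Nat) (s : List (Int × Int)) (x y : Int),
    s.Nodup → pvV0 land m n (x, y) → (x, y) ∉ s → pvUcard land m n s < fuel →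
    pvSearchSpec land m n s (x, y) (pvDfsA land m n fuel s x y) := by
  intro fuel
  induction fuel with
  | zero => intro s x y _ _ _ hfuel; omega
  | succ fuel IH =>
    intro s x y hnd hv hns hfuel
    have hadd : PySem.Set.add s (x, y) = s ++ [(x, y)] := PySem.Set.add_of_not_mem hns
    have hnd1 : (s ++ [(x, y)]).Nodup := by
      simp only [List.nodup_append, List.nodup_singleton, true_and]
      refine ⟨hnd, ?_⟩
      intro a ha b hb
      intro hc
      rw [List.mem_singleton.mp hb] at hc
      exact hns (hc ▸ ha)
    set F : Int × List (Int × Int) := pvDirecs.foldl (fun (st : Int × List (Int × Int)) ab =>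
      if ab.1 = 0 ∧ ab.2 = 0 then st
      else
        let nx := x + ab.1
        let ny := y + ab.2
        if nx < 0 ∨ nx ≥ m ∨ ny < 0 ∨ ny ≥ n then st
        else if pvCell land nx ny ≠ 0 then st
        else if (nx, ny) ∈ st.2 then st
        else
          let r2 := pvDfsA land m n fuel st.2 nx ny
          (st.1 + r2.1, r2.2)) (0, s ++ [(x, y)]) with hF
    have hres := pvDfsA_fold land m n fuel IH s x y hfuel hv hns pvDirecs
      (fun ab hab => (mem_pvDirecs ab).mp hab) 0 (s ++ [(x, y)]) hnd1
      (fun q hq => List.mem_append_left _ hq) (by simp)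
      (by
        intro q hq
        rcases List.mem_append.mp hq with hq' | hq'
        · exact Or.inl hq'
        · rw [List.mem_singleton.mp hq']; exact Or.inr pvReachA.refl)
      (by simp)
      (by
        intro q hq hqs hqp
        rcases List.mem_append.mp hq with hq' | hq'
        · exact absurd hq' hqs
        · exact absurd (List.mem_singleton.mp hq') hqp)
    rw [← hF] at hres
    obtain ⟨hN, hMcur, hMp, hSound, hCnt, hClosed, hCov⟩ := hres
    have hdfs : pvDfsA land m n (fuel + 1) s x y = (F.1 + 1, F.2) := by
      rw [hF]
      simp only [pvDfsA, hadd]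
    have hcompl : ∀ q, pvReachA land m n s (x, y) q → q ∈ F.2 := by
      intro q hq
      induction hq with
      | refl => exact hMp
      | @step q' r hq' hadj hvr hrs ihq =>
        by_cases hq'p : q' = (x, y)
        · subst hq'p
          have hb : -1 ≤ r.1 - x ∧ r.1 - x ≤ 1 ∧ -1 ≤ r.2 - y ∧ r.2 - y ≤ 1 := by
            obtain ⟨hne, hb⟩ := hadj
            simp at hb
            omega
          have habmem : ((r.1 - x, r.2 - y) : Int × Int) ∈ pvDirecs :=
            (mem_pvDirecs _).mpr hb
          have hne00 : ¬((r.1 - x : Int) = 0 ∧ (r.2 - y : Int) = 0) := by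
            intro hc
            exact hadj.1 (by
              obtain ⟨e1, e2⟩ := hc
              exact ((Prod.ext (by omega) (by omega)) : r = ((x, y) : Int × Int)) ▸ rfl)
          have hthis := hCov (r.1 - x, r.2 - y) habmem hne00
          simp only [add_sub_cancel, Prod.mk.eta] at hthis
          exact hthis hvr
        · have hq's : q' ∉ s := pvReachA_notin land m n s (x, y) q' hq' hns
          exact hClosed q' ihq hq's hq'p r hadj hvr
    rw [pvSearchSpec, hdfs]
    refine ⟨hN, ?_, ?_⟩
    · intro q
      constructor
      · intro hq
        exact hSound q hq
      · intro hq
        rcases hq with h | h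
        · exact hMcur q (List.mem_append_left _ h)
        · exact hcompl q h
    · simp only []
      omega

-- ===== B-side lemmas =====

theorem pvAdj_symm (p q : Int × Int) (h : pvAdj p q) : pvAdj q p := by
  obtain ⟨h1, h2⟩ := h
  exact ⟨fun e => h1 e.symm, by omega⟩

theorem pvReachA_water (land : List (List Int)) (m n : Int) (s : List (Int × Int))
    (p q : Int × Int) (h : pvReachA land m n s p q) (hp : pvV0 land m n p) :
    pvV0 land m n q := by
  induction h with
  | refl => exact hp
  | step _ _ h3 _ _ => exact h3

-- reachability ignoring the seen set implies reachability avoiding a closed seen set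
theorem pvReach_of_nil (land : List (List Int)) (m n : Int) (s : List (Int × Int))
    (hcl : ∀ q ∈ s, ∀ r, pvAdj q r → pvV0 land m n r → r ∈ s)
    (p : Int × Int) (hp : p ∉ s) (hv : pvV0 land m n p) :
    ∀ q, pvReachA land m n [] p q → pvReachA land m n s p q := by
  intro q h
  induction h with
  | refl => exact pvReachA.refl
  | @step q' r hq' hadj hvr _ ih =>
    have hq's : q' ∉ s := pvReachA_notin land m n s p q' ih hp
    have hrs : r ∉ s := by
      intro hrs
      exact hq's (hcl r hrs q' (pvAdj_symm q' r hadj)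
        (pvReachA_water land m n [] p q' hq' hv))
    exact pvReachA.step ih hadj hvr hrs

theorem mem_pvWaterList (land : List (List Int)) (m n : Int) (q : Int × Int) :
    q ∈ pvWaterList land m n ↔ pvV0 land m n q := by
  obtain ⟨a, b⟩ := q
  simp only [pvWaterList, List.mem_flatMap, List.mem_map, List.mem_filter,
    PySem.List.mem_pyRange_one, pvV0, Prod.mk.injEq, decide_eq_true_eq]
  constructor
  · rintro ⟨i, ⟨hi0, hi1⟩, j, ⟨⟨hj0, hj1⟩, hc⟩, rfl, rfl⟩
    exact ⟨hi0, hi1, hj0, hj1, hc⟩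
  · rintro ⟨h1, h2, h3, h4, h5⟩
    exact ⟨a, ⟨h1, h2⟩, b, ⟨⟨h3, h4⟩, h5⟩, rfl, rfl⟩

theorem mem_pvOffs (d : Int × Int) :
    d ∈ pvOffs ↔ (-1 ≤ d.1 ∧ d.1 ≤ 1 ∧ -1 ≤ d.2 ∧ d.2 ≤ 1) ∧ ¬(d.1 = 0 ∧ d.2 = 0) := by
  obtain ⟨a, b⟩ := d
  simp [pvOffs, Prod.ext_iff]
  omega

-- the fold over the 8 offsets at one frontier cell
theorem pvOffsFold (land : List (List Int)) (m n : Int) (ws : List (Int × Int))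
    (hws : ∀ q, q ∈ ws ↔ pvV0 land m n q) (c₀ c : Int × Int)
    (hc : pvReachA land m n [] c₀ c) :
    ∀ (l : List (Int × Int)),
    (∀ d ∈ l, (-1 ≤ d.1 ∧ d.1 ≤ 1 ∧ -1 ≤ d.2 ∧ d.2 ≤ 1) ∧ ¬(d.1 = 0 ∧ d.2 = 0)) →
    ∀ (comp₀ comp nxt : List (Int × Int)),
    comp.Nodup → (∀ q ∈ comp₀, q ∈ comp) → (∀ q ∈ comp, q ∈ comp₀ ∨ q ∈ nxt) →
    (∀ q ∈ nxt, q ∈ comp ∧ q ∉ comp₀ ∧ pvReachA land m n [] c₀ q ∧ q ∈ ws) →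
    comp.length = comp₀.length + nxt.length →
    (fun (R : List (Int × Int) × List (Int × Int)) =>
      R.1.Nodup ∧ (∀ q ∈ comp, q ∈ R.1) ∧ (∀ q ∈ R.1, q ∈ comp₀ ∨ q ∈ R.2) ∧
      (∀ q ∈ R.2, q ∈ R.1 ∧ q ∉ comp₀ ∧ pvReachA land m n [] c₀ q ∧ q ∈ ws) ∧
      R.1.length = comp₀.length + R.2.length ∧
      (∀ q ∈ nxt, q ∈ R.2) ∧
      (∀ d ∈ l, (c.1 + d.1, c.2 + d.2) ∈ ws → (c.1 + d.1, c.2 + d.2) ∈ R.1))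
    (l.foldl (fun st d =>
      let q := (c.1 + d.1, c.2 + d.2)
      if q ∈ ws ∧ q ∉ st.1 then (PySem.Set.add st.1 q, st.2 ++ [q]) else st) (comp, nxt)) := by
  intro l
  induction l with
  | nil =>
    intro _ comp₀ comp nxt h1 h2 h3 h4 h5
    exact ⟨h1, fun q hq => hq, h3, h4, h5, fun q hq => hq, by simp⟩
  | cons d l ihl =>
    intro hl comp₀ comp nxt h1 h2 h3 h4 h5
    have hld := hl d List.mem_cons_self
    have hl' := fun d' h => hl d' (List.mem_cons_of_mem _ h)
    rw [List.foldl_cons]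
    set q := (c.1 + d.1, c.2 + d.2) with hq
    by_cases hpush : q ∈ ws ∧ q ∉ comp
    · simp only [if_pos hpush]
      have hadd : PySem.Set.add comp q = comp ++ [q] := PySem.Set.add_of_not_mem hpush.2
      have hvq : pvV0 land m n q := (hws q).mp hpush.1
      have hadj : pvAdj c q := by
        refine ⟨fun e => hld.2 ?_, by simp [hq]; omega⟩
        have e1 : c.1 = q.1 := congrArg Prod.fst e
        have e2 : c.2 = q.2 := congrArg Prod.snd e
        simp [hq] at e1 e2
        constructor <;> omega
      have hreachq : pvReachA land m n [] c₀ q :=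
        pvReachA.step hc hadj hvq (by simp)
      have hnd1 : (comp ++ [q]).Nodup := by
        simp only [List.nodup_append, List.nodup_singleton, true_and]
        refine ⟨h1, ?_⟩
        intro a ha b hb hab
        rw [List.mem_singleton.mp hb] at hab
        exact hpush.2 (hab ▸ ha)
      have hqc₀ : q ∉ comp₀ := fun hcc => hpush.2 (h2 _ hcc)
      have hres := ihl hl' comp₀ (comp ++ [q]) (nxt ++ [q]) hnd1
        (fun r hr => List.mem_append_left _ (h2 r hr))
        (by
          intro r hr
          rcases List.mem_append.mp hr with hr' | hr'
          · rcases h3 r hr' with h | h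
            · exact Or.inl h
            · exact Or.inr (List.mem_append_left _ h)
          · exact Or.inr (List.mem_append_right _ hr'))
        (by
          intro r hr
          rcases List.mem_append.mp hr with hr' | hr'
          · obtain ⟨a1, a2, a3, a4⟩ := h4 r hr'
            exact ⟨List.mem_append_left _ a1, a2, a3, a4⟩
          · rw [List.mem_singleton.mp hr']
            exact ⟨List.mem_append_right _ (by simp), hqc₀, hreachq, hpush.1⟩)
        (by simp only [List.length_append, List.length_singleton]; omega)
      rw [hadd]
      obtain ⟨c1, c2, c3, c4, c5, c6, c7⟩ := hres
      refine ⟨c1, fun r hr => c2 r (List.mem_append_left _ hr), c3, c4, c5,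
        fun r hr => c6 r (List.mem_append_left _ hr), ?_⟩
      intro d' hd' hwd'
      rcases List.mem_cons.mp hd' with rfl | hd'
      · exact c2 _ (List.mem_append_right _ (by simp [hq]))
      · exact c7 d' hd' hwd'
    · simp only [if_neg hpush]
      have hres := ihl hl' comp₀ comp nxt h1 h2 h3 h4 h5
      obtain ⟨c1, c2, c3, c4, c5, c6, c7⟩ := hres
      refine ⟨c1, c2, c3, c4, c5, c6, ?_⟩
      intro d' hd' hwd'
      rcases List.mem_cons.mp hd' with rfl | hd'
      · have hqc : q ∈ comp := by
          by_contra hqc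
          exact hpush ⟨hwd', hqc⟩
        exact c2 _ hqc
      · exact c7 d' hd' hwd'

-- the fold of pvLevelStep over a whole frontier
theorem pvLevelFold (land : List (List Int)) (m n : Int) (ws : List (Int × Int))
    (hws : ∀ q, q ∈ ws ↔ pvV0 land m n q) (c₀ : Int × Int) :
    ∀ (fr : List (Int × Int)), (∀ p ∈ fr, pvReachA land m n [] c₀ p) →
    ∀ (comp₀ comp nxt : List (Int × Int)),
    comp.Nodup → (∀ q ∈ comp₀, q ∈ comp) → (∀ q ∈ comp, q ∈ comp₀ ∨ q ∈ nxt) →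
    (∀ q ∈ nxt, q ∈ comp ∧ q ∉ comp₀ ∧ pvReachA land m n [] c₀ q ∧ q ∈ ws) →
    comp.length = comp₀.length + nxt.length →
    (fun (R : List (Int × Int) × List (Int × Int)) =>
      R.1.Nodup ∧ (∀ q ∈ comp, q ∈ R.1) ∧ (∀ q ∈ R.1, q ∈ comp₀ ∨ q ∈ R.2) ∧
      (∀ q ∈ R.2, q ∈ R.1 ∧ q ∉ comp₀ ∧ pvReachA land m n [] c₀ q ∧ q ∈ ws) ∧
      R.1.length = comp₀.length + R.2.length ∧
      (∀ q ∈ nxt, q ∈ R.2) ∧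
      (∀ p ∈ fr, ∀ r, pvAdj p r → pvV0 land m n r → r ∈ R.1))
    (fr.foldl (pvLevelStep ws) (comp, nxt)) := by
  intro fr
  induction fr with
  | nil =>
    intro _ comp₀ comp nxt h1 h2 h3 h4 h5
    exact ⟨h1, fun q hq => hq, h3, h4, h5, fun q hq => hq, by simp⟩
  | cons p fr ihfr =>
    intro hfr comp₀ comp nxt h1 h2 h3 h4 h5
    have hp := hfr p List.mem_cons_self
    have hfr' := fun p' h => hfr p' (List.mem_cons_of_mem _ h)
    rw [List.foldl_cons]
    have hoffs := pvOffsFold land m n ws hws c₀ p hp pvOffs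
      (fun d hd => (mem_pvOffs d).mp hd) comp₀ comp nxt h1 h2 h3 h4 h5
    rw [pvLevelStep]
    set S := pvOffs.foldl (fun st d =>
      let q := (p.1 + d.1, p.2 + d.2)
      if q ∈ ws ∧ q ∉ st.1 then (PySem.Set.add st.1 q, st.2 ++ [q]) else st) (comp, nxt) with hS
    obtain ⟨b1, b2, b3, b4, b5, b6, b7⟩ := hoffs
    have hres := ihfr hfr' comp₀ S.1 S.2 b1 (fun q hq => b2 q (h2 q hq)) b3 b4 b5
    obtain ⟨c1, c2, c3, c4, c5, c6, c7⟩ := hres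
    refine ⟨c1, fun q hq => c2 q (b2 q hq), c3, c4, c5, fun q hq => c6 q (b6 q hq), ?_⟩
    intro p' hp' r hadj hvr
    rcases List.mem_cons.mp hp' with rfl | hp'
    · have hd : ((r.1 - p'.1, r.2 - p'.2) : Int × Int) ∈ pvOffs := by
        rw [mem_pvOffs]
        obtain ⟨hne, hb⟩ := hadj
        refine ⟨by simp; omega, ?_⟩
        intro hcc
        exact hne (by
          obtain ⟨e1, e2⟩ := hcc
          simp at e1 e2
          exact (Prod.ext (by omega) (by omega)))
      have hthis := b7 _ hd
      simp only [add_sub_cancel, Prod.mk.eta] at hthis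
      exact c2 _ (hthis ((hws r).mpr hvr))
    · exact c7 p' hp' r hadj hvr

theorem pvBfs_nil (ws : List (Int × Int)) (fuel : Nat) (comp : List (Int × Int)) :
    pvBfs ws fuel comp [] = comp := by
  cases fuel <;> simp [pvBfs]

-- the while loop: given enough fuel, the result is the closure of comp
theorem pvBfs_run (land : List (List Int)) (m n : Int) (ws : List (Int × Int))
    (hws : ∀ q, q ∈ ws ↔ pvV0 land m n q) (c₀ : Int × Int) :
    ∀ (fuel : Nat) (comp frontier : List (Int × Int)),
    comp.Nodup → (∀ p ∈ frontier, p ∈ comp) →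
    (∀ q ∈ comp, pvReachA land m n [] c₀ q ∧ q ∈ ws) →
    (∀ q ∈ comp, q ∉ frontier → ∀ r, pvAdj q r → pvV0 land m n r → r ∈ comp) →
    ws.length + 2 ≤ fuel + comp.length →
    (fun (R : List (Int × Int)) =>
      R.Nodup ∧ (∀ q ∈ comp, q ∈ R) ∧ (∀ q ∈ R, pvReachA land m n [] c₀ q) ∧
      (∀ q ∈ R, ∀ r, pvAdj q r → pvV0 land m n r → r ∈ R))
    (pvBfs ws fuel comp frontier) := by
  intro fuel
  induction fuel with
  | zero =>
    intro comp frontier h1 _ h3 _ hfuel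
    have hsub : comp ⊆ ws := fun q hq => (h3 q hq).2
    have := (List.subperm_of_subset h1 hsub).length_le
    omega
  | succ fuel IH =>
    intro comp frontier h1 h2 h3 h4 hfuel
    by_cases hfe : frontier = []
    · subst hfe
      rw [pvBfs_nil]
      exact ⟨h1, fun q hq => hq, fun q hq => (h3 q hq).1,
        fun q hq r hadj hvr => h4 q hq (by simp) r hadj hvr⟩
    · have hfeb : frontier.isEmpty = false := by
        simp [List.isEmpty_iff, hfe]
      simp only [pvBfs, hfeb, Bool.false_eq_true, if_false]
      have hlev := pvLevelFold land m n ws hws c₀ frontier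
        (fun p hp => (h3 p (h2 p hp)).1) comp comp [] h1 (fun q hq => hq)
        (fun q hq => Or.inl hq) (by simp) (by simp)
      set S := frontier.foldl (pvLevelStep ws) (comp, []) with hS
      obtain ⟨b1, b2, b3, b4, b5, b6, b7⟩ := hlev
      have hclosed' : ∀ q ∈ S.1, q ∉ S.2 → ∀ r, pvAdj q r → pvV0 land m n r → r ∈ S.1 := by
        intro q hq hq2 r hadj hvr
        rcases b3 q hq with hq' | hq'
        · by_cases hqf : q ∈ frontier
          · exact b7 q hqf r hadj hvr
          · exact b2 _ (h4 q hq' hqf r hadj hvr)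
        · exact absurd hq' hq2
      have hreach' : ∀ q ∈ S.1, pvReachA land m n [] c₀ q ∧ q ∈ ws := by
        intro q hq
        rcases b3 q hq with hq' | hq'
        · exact h3 q hq'
        · exact ⟨(b4 q hq').2.2.1, (b4 q hq').2.2.2⟩
      by_cases hS2 : S.2 = []
      · rw [hS2, pvBfs_nil]
        refine ⟨b1, b2, fun q hq => (hreach' q hq).1, ?_⟩
        intro q hq r hadj hvr
        exact hclosed' q hq (by rw [hS2]; simp) r hadj hvr
      · have hlen1 : 1 ≤ S.2.length := by
          cases hSc : S.2 with
          | nil => exact absurd hSc hS2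
          | cons a t => simp
        have hres := IH S.1 S.2 b1 (fun p hp => (b4 p hp).1) hreach' hclosed'
          (by omega)
        exact ⟨hres.1, fun q hq => hres.2.1 q (b2 q hq), hres.2.2.1, hres.2.2.2⟩

theorem pvBfs_spec (land : List (List Int)) (m n : Int) (ws : List (Int × Int))
    (hws : ∀ q, q ∈ ws ↔ pvV0 land m n q) (c : Int × Int) (hcw : c ∈ ws)
    (fuel : Nat) (hfuel : ws.length + 1 ≤ fuel) :
    (pvBfs ws fuel [c] [c]).Nodup ∧
    (∀ q, q ∈ pvBfs ws fuel [c] [c] ↔ pvReachA land m n [] c q) := by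
  have hres := pvBfs_run land m n ws hws c fuel [c] [c] (List.nodup_singleton _)
    (fun p hp => hp)
    (fun q hq => by rw [List.mem_singleton.mp hq]; exact ⟨pvReachA.refl, hcw⟩)
    (fun q hq hq2 => absurd hq hq2)
    (by simp only [List.length_singleton]; omega)
  obtain ⟨d1, d2, d3, d4⟩ := hres
  refine ⟨d1, fun q => ⟨d3 q, ?_⟩⟩
  intro hq
  induction hq with
  | refl => exact d2 c (by simp)
  | @step q' r hq' hadj hvr _ ih => exact d4 q' ih r hadj hvr

-- ===== bridging A's scan to a fold over the water list =====

-- the body of A's scan, seen from a water cell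
def pvStartA (land : List (List Int)) (m n : Int) (fuel : Nat)
    (st : List (Int × Int) × List Int) (c : Int × Int) : List (Int × Int) × List Int :=
  if c ∈ st.1 then st
  else
    let r := pvDfsA land m n fuel st.1 c.1 c.2
    (r.2, st.2 ++ [r.1])

theorem pvRowA (land : List (List Int)) (m n : Int) (fuel : Nat) (i : Int) :
    ∀ (js : List Int) (st : List (Int × Int) × List Int),
    js.foldl (pvStepA land m n fuel i) st
      = ((js.filter (fun j => decide (pvCell land i j = 0))).map (fun j => (i, j))).foldl
          (pvStartA land m n fuel) st := by
  intro js
  induction js with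
  | nil => intro st; rfl
  | cons j js ih =>
    intro st
    rw [List.foldl_cons]
    by_cases h : pvCell land i j = 0
    · have hf : decide (pvCell land i j = 0) = true := decide_eq_true h
      have hfilt : List.filter (fun j' => decide (pvCell land i j' = 0)) (j :: js)
          = j :: List.filter (fun j' => decide (pvCell land i j' = 0)) js := by
        simp [List.filter_cons, hf]
      rw [hfilt, List.map_cons, List.foldl_cons]
      have hstep : pvStepA land m n fuel i st j = pvStartA land m n fuel st (i, j) := by
        simp [pvStepA, pvStartA, h]
      rw [hstep, ih]
    · have hf : decide (pvCell land i j = 0) = false := decide_eq_false h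
      have hfilt : List.filter (fun j' => decide (pvCell land i j' = 0)) (j :: js)
          = List.filter (fun j' => decide (pvCell land i j' = 0)) js := by
        simp [List.filter_cons, hf]
      rw [hfilt]
      have hstep : pvStepA land m n fuel i st j = st := by
        simp [pvStepA, h]
      rw [hstep, ih]

theorem pvFoldl_flatMap {α β γ : Type} (l : List α) (g : α → List β)
    (f : γ → β → γ) (init : γ) :
    (l.flatMap g).foldl f init = l.foldl (fun st a => (g a).foldl f st) init := by
  induction l generalizing init with
  | nil => rfl
  | cons a l ih => rw [List.flatMap_cons, List.foldl_append, List.foldl_cons, ih]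

theorem pvScanA_eq_water (land : List (List Int)) (m n : Int) (fuel : Nat) :
    (PySem.List.pyRange 0 m 1).foldl
      (fun st i => (PySem.List.pyRange 0 n 1).foldl (pvStepA land m n fuel i) st) ([], [])
    = (pvWaterList land m n).foldl (pvStartA land m n fuel) ([], []) := by
  rw [pvWaterList, pvFoldl_flatMap]
  have hfun : (fun (st : List (Int × Int) × List Int) i =>
      (PySem.List.pyRange 0 n 1).foldl (pvStepA land m n fuel i) st)
    = (fun (st : List (Int × Int) × List Int) i =>
      (((PySem.List.pyRange 0 n 1).filter (fun j => decide (pvCell land i j = 0))).map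
        (fun j => (i, j))).foldl (pvStartA land m n fuel) st) := by
    funext st i
    exact pvRowA land m n fuel i (PySem.List.pyRange 0 n 1) st
  rw [hfun]

-- ===== the main scan comparison =====

theorem pvWaterFold (land : List (List Int)) (m n : Int) (fuelA fuelB : Nat)
    (hfA : m.toNat * n.toNat < fuelA)
    (hfB : (pvWaterList land m n).length + 1 ≤ fuelB) :
    ∀ (cs : List (Int × Int)), (∀ c ∈ cs, pvV0 land m n c) →
    ∀ (sA sB : List (Int × Int)) (ponds : List Int),
    sA.Nodup → sB.Nodup → (∀ q, q ∈ sA ↔ q ∈ sB) →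
    (∀ q ∈ sA, ∀ r, pvAdj q r → pvV0 land m n r → r ∈ sA) →
    (cs.foldl (pvStartA land m n fuelA) (sA, ponds)).2
      = (cs.foldl (pvScan (pvWaterList land m n) fuelB) (sB, ponds)).2 := by
  intro cs
  induction cs with
  | nil => intro _ sA sB ponds _ _ _ _; rfl
  | cons c cs ih =>
    intro hcs sA sB ponds h1 h2 h3 h4
    have hvc := hcs c List.mem_cons_self
    have hcs' := fun c' h => hcs c' (List.mem_cons_of_mem _ h)
    rw [List.foldl_cons, List.foldl_cons]
    by_cases hmem : c ∈ sA
    · have hmemB : c ∈ sB := (h3 c).mp hmem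
      rw [show pvStartA land m n fuelA (sA, ponds) c = (sA, ponds) by
            simp [pvStartA, hmem],
          show pvScan (pvWaterList land m n) fuelB (sB, ponds) c = (sB, ponds) by
            simp [pvScan, hmemB]]
      exact ih hcs' sA sB ponds h1 h2 h3 h4
    · have hmemB : c ∉ sB := fun hc => hmem ((h3 c).mpr hc)
      have hfuelA' : pvUcard land m n sA < fuelA :=
        lt_of_le_of_lt (pvUcard_le land m n sA) hfA
      have hvc' : pvV0 land m n (c.1, c.2) := hvc
      obtain ⟨a1, a2, a3⟩ := pvDfsA_spec land m n fuelA sA c.1 c.2 h1 hvc' hmem hfuelA'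
      have hcw : c ∈ pvWaterList land m n := (mem_pvWaterList land m n c).mpr hvc
      obtain ⟨b1, b2⟩ := pvBfs_spec land m n (pvWaterList land m n)
        (mem_pvWaterList land m n) c hcw fuelB hfB
      set r := pvDfsA land m n fuelA sA c.1 c.2 with hr
      set comp := pvBfs (pvWaterList land m n) fuelB [c] [c] with hcomp
      -- the two reachability notions agree here
      have hiff : ∀ q, pvReachA land m n sA (c.1, c.2) q ↔ pvReachA land m n [] c q := by
        intro q
        constructor
        · intro h
          exact pvReachA_mono land m n [] sA (c.1, c.2) q (by simp) h
        · intro h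
          exact pvReach_of_nil land m n sA h4 c hmem hvc q h
      -- comp is disjoint from sA
      have hdisj : ∀ q ∈ comp, q ∉ sA := by
        intro q hq
        exact pvReachA_notin land m n sA (c.1, c.2) q ((hiff q).mpr ((b2 q).mp hq)) hmem
      -- membership of the two new seen sets agrees
      have hmemEq : ∀ q, q ∈ r.2 ↔ q ∈ sB ∨ q ∈ comp := by
        intro q
        rw [a2 q, b2 q, hiff q, h3 q]
      -- r.2 ~ sA ++ comp, so the appended counts agree
      have hndapp : (sA ++ comp).Nodup :=
        List.Nodup.append h1 b1 (fun q hq hq' => hdisj q hq' hq)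
      have hmemApp : ∀ q, q ∈ r.2 ↔ q ∈ sA ++ comp := by
        intro q
        rw [hmemEq q, List.mem_append, h3 q]
      have hlen : r.2.length = sA.length + comp.length := by
        have := ((List.perm_ext_iff_of_nodup a1 hndapp).mpr hmemApp).length_eq
        simpa using this
      have hcnt : r.1 = (comp.length : Int) := by
        rw [a3, hlen]
        push_cast
        ring
      have hstepA : pvStartA land m n fuelA (sA, ponds) c = (r.2, ponds ++ [r.1]) := by
        simp [pvStartA, hmem, hr]
      have hstepB : pvScan (pvWaterList land m n) fuelB (sB, ponds) c
          = (PySem.Set.update sB comp, ponds ++ [(comp.length : Int)]) := by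
        simp [pvScan, hmemB, hcomp]
      rw [hstepA, hstepB, hcnt]
      -- new invariants
      have hndB' : (PySem.Set.update sB comp).Nodup := PySem.Set.nodup_update sB comp h2
      have hmemEq' : ∀ q, q ∈ r.2 ↔ q ∈ PySem.Set.update sB comp := by
        intro q
        rw [hmemEq q, PySem.Set.mem_update]
      have hclosed' : ∀ q ∈ r.2, ∀ r', pvAdj q r' → pvV0 land m n r' → r' ∈ r.2 := by
        intro q hq r' hadj hvr'
        rcases (a2 q).mp hq with hq' | hq'
        · exact (a2 r').mpr (Or.inl (h4 q hq' r' hadj hvr'))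
        · by_cases hr's : r' ∈ sA
          · exact (a2 r').mpr (Or.inl hr's)
          · exact (a2 r').mpr (Or.inr (pvReachA.step hq' hadj hvr' hr's))
      exact ih hcs' r.2 (PySem.Set.update sB comp) (ponds ++ [(comp.length : Int)])
        a1 hndB' hmemEq' hclosed'

-- ===== VERDICT (by name: the statement is the Claim_ definition above) =====
theorem pondSizes_spec : Claim_equal_pondSizes := by
  intro land _ _
  unfold Spec_pondSizes pondSizes pondSizes_alt
  have hA := pvScanA_eq_water land (land.length : Int)
    (((PySem.List.pyGet? land 0).getD []).length : Int)
    (land.length * ((((PySem.List.pyGet? land 0).getD []).length : Int)).toNat + 1)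
  have hmain := pvWaterFold land (land.length : Int)
    (((PySem.List.pyGet? land 0).getD []).length : Int)
    (land.length * ((((PySem.List.pyGet? land 0).getD []).length : Int)).toNat + 1)
    ((pvWaterList land (land.length : Int)
      (((PySem.List.pyGet? land 0).getD []).length : Int)).length + 2)
    (by simp) (by omega)
    (pvWaterList land (land.length : Int)
      (((PySem.List.pyGet? land 0).getD []).length : Int))
    (fun c hc => (mem_pvWaterList land _ _ c).mp hc)
    [] [] [] List.nodup_nil List.nodup_nil (fun q => Iff.rfl) (by simp)
  exact congrArg (fun l => PySem.List.sorted l (fun x => x) false)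
    ((congrArg Prod.snd hA).trans hmain)
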